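-- pv_equiv track=rewrite | github.com/sschwa12/grokking | 2-island/pc1-island-perimiter.py | island_perimiter
-- ===== SOURCE A (Python) =====
-- def island_perimiter(matrix):
--     ROWS, COLS = len(matrix), len(matrix[0])
--     seen = set()
--
--     def dfs(r, c):
--         if r not in range(ROWS) or c not in range(COLS) or matrix[r][c] == 0:
--             return 1
--         if (r, c) in seen:
--             return 0
--         seen.add((r, c))
--         directions = [[1, 0], [-1, 0], [0, 1], [0, -1]]
--         return sum([dfs(dr + r, dc + c) for dr, dc in directions])
--
--
--     for row in range(ROWS):
--         for col in range(COLS):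
--             if matrix[row][col] == 1 and (row, col) not in seen:
--                 return dfs(row, col)
--     return 0
-- ===== SOURCE B (Python) =====
-- def island_perimiter(matrix):
--     ROWS, COLS = len(matrix), len(matrix[0])
--     for row in range(ROWS):
--         for col in range(COLS):
--             if matrix[row][col] == 1:
--                 seen = set()
--                 stack = [(row, col)]
--                 perim = 0
--                 while stack:
--                     r, c = stack.pop()
--                     if r not in range(ROWS) or c not in range(COLS) or matrix[r][c] == 0:
--                         perim += 1
--                         continue
--                     if (r, c) in seen:
--                         continue
--                     seen.add((r, c))
--                     for d in ((0, -1), (0, 1), (-1, 0), (1, 0)):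
--                         stack.append((r + d[0], c + d[1]))
--                 return perim
--     return 0
-- ===== Notes on version B (the rewrite author's own statement) =====
-- stated objective: alternative
-- what changed: The recursive dfs that sums four nested calls while sharing a seen set is replaced by an iterative traversal with an explicit stack and a perimeter accumulator (pop a cell, count out-of-bounds/water pops, mark land cells seen and push their four neighbours), removing Python function-call recursion.
-- outside the precondition, e.g. on island_perimiter([[1, 0], [0]]): A returns 4, B returns 4
import Mathlib
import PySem

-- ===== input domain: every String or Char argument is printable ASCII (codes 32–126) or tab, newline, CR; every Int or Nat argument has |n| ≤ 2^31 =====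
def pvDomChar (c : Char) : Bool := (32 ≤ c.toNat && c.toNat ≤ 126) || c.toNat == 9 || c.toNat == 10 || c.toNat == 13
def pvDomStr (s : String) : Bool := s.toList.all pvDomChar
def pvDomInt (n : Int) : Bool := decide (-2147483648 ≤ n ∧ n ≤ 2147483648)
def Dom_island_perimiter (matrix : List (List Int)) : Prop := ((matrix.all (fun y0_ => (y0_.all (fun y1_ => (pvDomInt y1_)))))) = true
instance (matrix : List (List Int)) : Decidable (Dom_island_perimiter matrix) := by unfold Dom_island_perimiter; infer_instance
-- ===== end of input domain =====

-- B replaces A's recursive dfs by an explicit-stack iterative traversal of the same first island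
-- (objective: alternative decomposition, same asymptotic cost).

-- ===== PORT A =====
-- A's dfs is unbounded Python recursion; the port takes a fuel parameter. The recursion depth is
-- bounded by the number of in-bounds cells plus one (every nested call follows an insertion of a
-- fresh in-bounds cell into `seen`), so the fuel ROWS*COLS+1 supplied below is never exhausted.
def pvA_dfs (matrix : List (List Int)) (ROWS COLS : Int) (fuel : Nat)
    (seen : PySem.Set (Int × Int)) (r c : Int) : Int × PySem.Set (Int × Int) :=
  match fuel with
  | 0 => (0, seen)
  | f + 1 =>
    if ¬ (0 ≤ r ∧ r < ROWS) ∨ ¬ (0 ≤ c ∧ c < COLS) ∨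
        PySem.List.pyGetD (PySem.List.pyGetD matrix r []) c 0 = 0 then
      (1, seen)
    else if PySem.Set.contains seen (r, c) then
      (0, seen)
    else
      -- directions [1,0], [-1,0], [0,1], [0,-1]; the comprehension threads `seen` left to right
      let p1 := pvA_dfs matrix ROWS COLS f (PySem.Set.add seen (r, c)) (r + 1) c
      let p2 := pvA_dfs matrix ROWS COLS f p1.2 (r - 1) c
      let p3 := pvA_dfs matrix ROWS COLS f p2.2 r (c + 1)
      let p4 := pvA_dfs matrix ROWS COLS f p3.2 r (c - 1)
      (p1.1 + p2.1 + p3.1 + p4.1, p4.2)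

-- the `for col in range(COLS)` loop of A: first land cell in this row starts the dfs
def pvA_scanCols (matrix : List (List Int)) (ROWS COLS : Int) (fuel : Nat)
    (seen : PySem.Set (Int × Int)) (row : Int) : List Int → Option Int
  | [] => none
  | col :: rest =>
    if PySem.List.pyGetD (PySem.List.pyGetD matrix row []) col 0 = 1 ∧
        ¬ PySem.Set.contains seen (row, col) then
      some (pvA_dfs matrix ROWS COLS fuel seen row col).1
    else pvA_scanCols matrix ROWS COLS fuel seen row rest

-- the `for row in range(ROWS)` loop of A
def pvA_scanRows (matrix : List (List Int)) (ROWS COLS : Int) (fuel : Nat)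
    (seen : PySem.Set (Int × Int)) : List Int → Option Int
  | [] => none
  | row :: rest =>
    match pvA_scanCols matrix ROWS COLS fuel seen row (PySem.List.pyRange 0 COLS 1) with
    | some v => some v
    | none => pvA_scanRows matrix ROWS COLS fuel seen rest

-- ROWS = len(matrix), COLS = len(matrix[0]); matrix = [] (IndexError) is excluded by Pre_
def island_perimiter (matrix : List (List Int)) : Int :=
  -- ROWS = len(matrix), COLS = len(matrix[0]); the fuel bounds the dfs recursion depth (see above)
  match pvA_scanRows matrix (matrix.length : Int) ((matrix.headD []).length : Int)
      (matrix.length * (matrix.headD []).length + 1)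
      PySem.Set.empty (PySem.List.pyRange 0 (matrix.length : Int) 1) with
  | some v => v
  | none => 0

-- ===== PORT B =====
-- helpers for the termination measure of B's while loop: the in-bounds cells not yet seen
def pvCells (ROWS COLS : Int) : List (Int × Int) :=
  (PySem.List.pyRange 0 ROWS 1).flatMap (fun r => (PySem.List.pyRange 0 COLS 1).map (fun c => (r, c)))

def pvUnseen (ROWS COLS : Int) (seen : PySem.Set (Int × Int)) : Nat :=
  ((pvCells ROWS COLS).filter (fun p => ¬ PySem.Set.contains seen p)).length

theorem pvFilter_add_le (l : List (Int × Int)) (seen : PySem.Set (Int × Int)) (p : Int × Int) :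
    (l.filter fun q => ¬ PySem.Set.contains (PySem.Set.add seen p) q).length ≤
      (l.filter fun q => ¬ PySem.Set.contains seen q).length := by
  rw [← List.countP_eq_length_filter, ← List.countP_eq_length_filter]
  apply List.countP_mono_left
  intro a _ ha
  simp only [decide_eq_true_eq, PySem.Set.contains_iff, PySem.Set.mem_add] at *
  tauto

theorem pvFilter_add_lt (l : List (Int × Int)) (seen : PySem.Set (Int × Int)) (p : Int × Int)
    (hmem : p ∈ l) (hns : ¬ PySem.Set.contains seen p) :
    (l.filter fun q => ¬ PySem.Set.contains (PySem.Set.add seen p) q).length <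
      (l.filter fun q => ¬ PySem.Set.contains seen q).length := by
  induction l with
  | nil => simp at hmem
  | cons x xs ih =>
    simp only [List.filter_cons]
    rcases List.mem_cons.mp hmem with hx | hx
    · subst hx
      rw [show (decide ¬PySem.Set.contains (PySem.Set.add seen p) p = true) = false by
          simp [PySem.Set.mem_add],
        show (decide ¬PySem.Set.contains seen p = true) = true by
          simp only [decide_eq_true_eq]; exact hns]
      simp only [if_true, List.length_cons]
      exact Nat.lt_succ_of_le (pvFilter_add_le xs seen p)
    · have hlt := ih hx
      by_cases hxa : PySem.Set.contains (PySem.Set.add seen p) x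
      · rw [show (decide ¬PySem.Set.contains (PySem.Set.add seen p) x = true) = false by
          simp only [PySem.Set.contains_iff, PySem.Set.mem_add] at hxa
          simp [PySem.Set.mem_add]
          tauto]
        simp only [Bool.false_eq_true, if_false]
        by_cases hxs : PySem.Set.contains seen x
        · rw [show (decide ¬PySem.Set.contains seen x = true) = false by
            simp at hxs ⊢; exact hxs]
          simpa using hlt
        · rw [show (decide ¬PySem.Set.contains seen x = true) = true by
            simp only [decide_eq_true_eq]; exact hxs]
          simp only [if_true, List.length_cons]
          omega
      · have hxs : ¬ PySem.Set.contains seen x = true := by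
          intro h
          exact hxa (by simp only [PySem.Set.contains_iff, PySem.Set.mem_add] at h ⊢; exact Or.inl h)
        rw [show (decide ¬PySem.Set.contains (PySem.Set.add seen p) x = true) = true by
            simp only [decide_eq_true_eq]; exact hxa,
          show (decide ¬PySem.Set.contains seen x = true) = true by
            simp only [decide_eq_true_eq]; exact hxs]
        simp only [if_true, List.length_cons]
        omega

theorem pvUnseen_lt_of_add (ROWS COLS : Int) (seen : PySem.Set (Int × Int)) (p : Int × Int)
    (hmem : p ∈ pvCells ROWS COLS) (hns : ¬ PySem.Set.contains seen p) :
    pvUnseen ROWS COLS (PySem.Set.add seen p) < pvUnseen ROWS COLS seen :=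
  pvFilter_add_lt (pvCells ROWS COLS) seen p hmem hns

theorem pvMem_cells (ROWS COLS r c : Int) (h1 : 0 ≤ r ∧ r < ROWS) (h2 : 0 ≤ c ∧ c < COLS) :
    (r, c) ∈ pvCells ROWS COLS := by
  unfold pvCells
  simp only [List.mem_flatMap, List.mem_map]
  exact ⟨r, by rw [PySem.List.mem_pyRange_one]; omega,
    ⟨c, by rw [PySem.List.mem_pyRange_one]; omega, rfl⟩⟩

-- B's while loop: pop (r, c); out-of-bounds or water adds 1; unseen land is marked and its
-- four neighbours are pushed (top of stack = head of the list; push order reversed w.r.t. pops)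
def pvB_loop (matrix : List (List Int)) (ROWS COLS : Int) :
    List (Int × Int) → PySem.Set (Int × Int) → Int → Int
  | [], _, perim => perim
  | (r, c) :: stack, seen, perim =>
    if h1 : ¬ (0 ≤ r ∧ r < ROWS) ∨ ¬ (0 ≤ c ∧ c < COLS) ∨
        PySem.List.pyGetD (PySem.List.pyGetD matrix r []) c 0 = 0 then
      pvB_loop matrix ROWS COLS stack seen (perim + 1)
    else if h2 : PySem.Set.contains seen (r, c) then
      pvB_loop matrix ROWS COLS stack seen perim
    else
      pvB_loop matrix ROWS COLS
        ((r + 1, c) :: (r - 1, c) :: (r, c + 1) :: (r, c - 1) :: stack)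
        (PySem.Set.add seen (r, c)) perim
  termination_by stack seen _ => (pvUnseen ROWS COLS seen, stack.length)
  decreasing_by
  · apply Prod.Lex.right; simp
  · apply Prod.Lex.right; simp
  · apply Prod.Lex.left
    push Not at h1
    exact pvUnseen_lt_of_add ROWS COLS seen (r, c) (pvMem_cells ROWS COLS r c h1.1 h1.2.1) h2

def pvB_scanCols (matrix : List (List Int)) (ROWS COLS : Int) (row : Int) : List Int → Option Int
  | [] => none
  | col :: rest =>
    if PySem.List.pyGetD (PySem.List.pyGetD matrix row []) col 0 = 1 then
      some (pvB_loop matrix ROWS COLS [(row, col)] PySem.Set.empty 0)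
    else pvB_scanCols matrix ROWS COLS row rest

def pvB_scanRows (matrix : List (List Int)) (ROWS COLS : Int) : List Int → Option Int
  | [] => none
  | row :: rest =>
    match pvB_scanCols matrix ROWS COLS row (PySem.List.pyRange 0 COLS 1) with
    | some v => some v
    | none => pvB_scanRows matrix ROWS COLS rest

def island_perimiter_alt (matrix : List (List Int)) : Int :=
  match pvB_scanRows matrix (matrix.length : Int) ((matrix.headD []).length : Int)
      (PySem.List.pyRange 0 (matrix.length : Int) 1) with
  | some v => v
  | none => 0

-- ===== PRECONDITION & SPEC =====
-- Pre_ excludes the empty matrix (len(matrix[0]) raises IndexError) and ragged matrices with a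
-- row shorter than the first row, on which A raises IndexError unless the traversal happens to
-- return before touching a missing cell (B behaves identically there in Python).
def Pre_island_perimiter (matrix : List (List Int)) : Prop :=
  matrix ≠ [] ∧ ∀ row ∈ matrix, (matrix.headD []).length ≤ row.length

instance (matrix : List (List Int)) : Decidable (Pre_island_perimiter matrix) := by
  unfold Pre_island_perimiter; infer_instance

def pvWitness_island_perimiter : List (List Int) := [[0, 1], [1, 1]]

def Spec_island_perimiter (matrix : List (List Int)) (out : Int) : Prop :=
  out = island_perimiter_alt matrix
instance (matrix : List (List Int)) (out : Int) : Decidable (Spec_island_perimiter matrix out) := by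
  unfold Spec_island_perimiter; infer_instance

-- ===== CLAIM (what is proved, stated in full; the proofs are below) =====
def Claim_equal_island_perimiter : Prop := ∀ (matrix : List (List Int)), Dom_island_perimiter matrix → Pre_island_perimiter matrix → Spec_island_perimiter matrix (island_perimiter matrix)

-- ===== LEMMAS AND PROOFS =====

theorem pvUnseen_le_of_add (ROWS COLS : Int) (seen : PySem.Set (Int × Int)) (p : Int × Int) :
    pvUnseen ROWS COLS (PySem.Set.add seen p) ≤ pvUnseen ROWS COLS seen :=
  pvFilter_add_le (pvCells ROWS COLS) seen p


-- `seen` only grows along A's dfs, so the count of unseen in-bounds cells never grows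
theorem pvA_dfs_unseen_le (matrix : List (List Int)) (ROWS COLS : Int) :
    ∀ (fuel : Nat) (seen : PySem.Set (Int × Int)) (r c : Int),
      pvUnseen ROWS COLS (pvA_dfs matrix ROWS COLS fuel seen r c).2 ≤ pvUnseen ROWS COLS seen := by
  intro fuel
  induction fuel with
  | zero => intro seen r c; simp [pvA_dfs]
  | succ f ih =>
    intro seen r c
    rw [pvA_dfs]
    split
    · exact le_refl _
    · split
      · exact le_refl _
      · exact le_trans (ih _ r (c - 1)) (le_trans (ih _ r (c + 1)) (le_trans (ih _ (r - 1) c)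
          (le_trans (ih _ (r + 1) c) (pvUnseen_le_of_add ROWS COLS seen (r, c)))))

-- simulation: one stack element of B's loop behaves exactly like one call of A's dfs
theorem pvSim (matrix : List (List Int)) (ROWS COLS : Int) :
    ∀ (fuel : Nat) (seen : PySem.Set (Int × Int)) (r c : Int) (stack : List (Int × Int))
      (perim : Int), pvUnseen ROWS COLS seen < fuel →
      pvB_loop matrix ROWS COLS ((r, c) :: stack) seen perim =
        pvB_loop matrix ROWS COLS stack (pvA_dfs matrix ROWS COLS fuel seen r c).2
          (perim + (pvA_dfs matrix ROWS COLS fuel seen r c).1) := by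
  intro fuel
  induction fuel with
  | zero => intro seen r c stack perim h; omega
  | succ f ih =>
    intro seen r c stack perim h
    rw [pvA_dfs, pvB_loop]
    by_cases h1 : ¬ (0 ≤ r ∧ r < ROWS) ∨ ¬ (0 ≤ c ∧ c < COLS) ∨
        PySem.List.pyGetD (PySem.List.pyGetD matrix r []) c 0 = 0
    · simp only [dif_pos h1, if_pos h1]
    · simp only [dif_neg h1, if_neg h1]
      by_cases h2 : PySem.Set.contains seen (r, c)
      · simp only [dif_pos h2, if_pos h2, add_zero]
      · simp only [dif_neg h2, if_neg h2]
        push Not at h1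
        have hmem := pvMem_cells ROWS COLS r c h1.1 h1.2.1
        have hu1 : pvUnseen ROWS COLS (PySem.Set.add seen (r, c)) < f :=
          Nat.lt_of_lt_of_le (pvUnseen_lt_of_add ROWS COLS seen (r, c) hmem h2) (Nat.lt_succ_iff.mp h)
        rw [ih (PySem.Set.add seen (r, c)) (r + 1) c _ _ hu1]
        have hu2 := Nat.lt_of_le_of_lt
          (pvA_dfs_unseen_le matrix ROWS COLS f (PySem.Set.add seen (r, c)) (r + 1) c) hu1
        rw [ih _ (r - 1) c _ _ hu2]
        have hu3 := Nat.lt_of_le_of_lt (pvA_dfs_unseen_le matrix ROWS COLS f _ (r - 1) c) hu2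
        rw [ih _ r (c + 1) _ _ hu3]
        have hu4 := Nat.lt_of_le_of_lt (pvA_dfs_unseen_le matrix ROWS COLS f _ r (c + 1)) hu3
        rw [ih _ r (c - 1) _ _ hu4]
        congr 1
        ring

theorem pvUnseen_empty_lt (ROWS COLS : Int) (RN CN : Nat) (hR : ROWS = (RN : Int))
    (hC : COLS = (CN : Int)) : pvUnseen ROWS COLS PySem.Set.empty < RN * CN + 1 := by
  unfold pvUnseen pvCells
  have hfil : ∀ l : List (Int × Int),
      (l.filter fun p => ¬PySem.Set.contains PySem.Set.empty p) = l := by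
    intro l; apply List.filter_eq_self.mpr; intro a _; simp [PySem.Set.empty]
  rw [hfil, List.length_flatMap]
  have : ∀ r : Int, (((PySem.List.pyRange 0 COLS 1).map fun c => (r, c)).length) = CN := by
    intro r; rw [List.length_map, PySem.List.length_pyRange_one, hC]; omega
  calc ((PySem.List.pyRange 0 ROWS 1).map
        fun r => ((PySem.List.pyRange 0 COLS 1).map fun c => (r, c)).length).sum
      = ((PySem.List.pyRange 0 ROWS 1).map fun _ => CN).sum := by
        apply congrArg; exact List.map_congr_left (fun r _ => this r)
    _ = (PySem.List.pyRange 0 ROWS 1).length * CN := by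
        rw [List.map_const', List.sum_replicate, smul_eq_mul]
    _ = RN * CN := by rw [PySem.List.length_pyRange_one, hR]; norm_num
    _ < RN * CN + 1 := Nat.lt_succ_self _

-- the dfs value at a start cell equals B's loop from the singleton stack
theorem pvStart_eq (matrix : List (List Int)) (ROWS COLS : Int) (fuel : Nat) (r c : Int)
    (h : pvUnseen ROWS COLS PySem.Set.empty < fuel) :
    (pvA_dfs matrix ROWS COLS fuel PySem.Set.empty r c).1 =
      pvB_loop matrix ROWS COLS [(r, c)] PySem.Set.empty 0 := by
  rw [pvSim matrix ROWS COLS fuel PySem.Set.empty r c [] 0 h, pvB_loop, zero_add]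

theorem pvScanCols_eq (matrix : List (List Int)) (ROWS COLS : Int) (fuel : Nat) (row : Int)
    (h : pvUnseen ROWS COLS PySem.Set.empty < fuel) :
    ∀ cols : List Int,
      pvA_scanCols matrix ROWS COLS fuel PySem.Set.empty row cols =
        pvB_scanCols matrix ROWS COLS row cols := by
  intro cols
  induction cols with
  | nil => rfl
  | cons col rest ih =>
    rw [pvA_scanCols, pvB_scanCols]
    have hc : ¬ PySem.Set.contains PySem.Set.empty (row, col) := by
      simp [PySem.Set.empty]
    by_cases hcell : PySem.List.pyGetD (PySem.List.pyGetD matrix row []) col 0 = 1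
    · rw [if_pos ⟨hcell, hc⟩, if_pos hcell, pvStart_eq matrix ROWS COLS fuel row col h]
    · rw [if_neg (by tauto), if_neg hcell]
      exact ih

theorem pvScanRows_eq (matrix : List (List Int)) (ROWS COLS : Int) (fuel : Nat)
    (h : pvUnseen ROWS COLS PySem.Set.empty < fuel) :
    ∀ rows : List Int,
      pvA_scanRows matrix ROWS COLS fuel PySem.Set.empty rows =
        pvB_scanRows matrix ROWS COLS rows := by
  intro rows
  induction rows with
  | nil => rfl
  | cons row rest ih =>
    rw [pvA_scanRows, pvB_scanRows, pvScanCols_eq matrix ROWS COLS fuel row h, ih]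

-- ===== VERDICT (by name: the statement is the Claim_ definition above) =====
theorem island_perimiter_spec : Claim_equal_island_perimiter := by
  intro matrix _ _
  unfold Spec_island_perimiter island_perimiter island_perimiter_alt
  rw [pvScanRows_eq matrix (matrix.length : Int) ((matrix.headD []).length : Int)
    (matrix.length * (matrix.headD []).length + 1)
    (pvUnseen_empty_lt _ _ matrix.length (matrix.headD []).length rfl rfl)]
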